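-- pv_equiv track=rewrite | github.com/fiorefabris/stochastic_phase_models | pulse_detection/consecutive_main.py | count_consecutive_pulses
-- ===== SOURCE A (Python) =====
-- from itertools import groupby
--
-- def count_iterable(iterator):
--     return sum(1 for i in iterator)
--
-- def count_consecutive_pulses(consecutive):
--     #cuenta la cantidad de unos aislados que hay en un vector
--     count = 0
--     for i, group in groupby(consecutive):
--         if i == 1:
--             if count_iterable(group) == 1:
--                 count = count + 1
--             else:
--                 pass
--     return(count)
-- ===== SOURCE B (Python) =====
-- def count_consecutive_pulses(consecutive):
--     # local-window test: an element counts iff it equals 1 and differs from both neighbors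
--     x = list(consecutive)
--     prevs = [None] + x[:-1]
--     nexts = x[1:] + [None]
--     return sum(1 for p, c, n in zip(prevs, x, nexts)
--                if c == 1 and p != c and n != c)
-- ===== Notes on version B (the rewrite author's own statement) =====
-- stated objective: alternative
-- what changed: Replaces groupby run formation plus per-group length counting with a single zip over (previous, current, next) neighbor triples, counting elements equal to 1 that differ from both neighbors.
import Mathlib
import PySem

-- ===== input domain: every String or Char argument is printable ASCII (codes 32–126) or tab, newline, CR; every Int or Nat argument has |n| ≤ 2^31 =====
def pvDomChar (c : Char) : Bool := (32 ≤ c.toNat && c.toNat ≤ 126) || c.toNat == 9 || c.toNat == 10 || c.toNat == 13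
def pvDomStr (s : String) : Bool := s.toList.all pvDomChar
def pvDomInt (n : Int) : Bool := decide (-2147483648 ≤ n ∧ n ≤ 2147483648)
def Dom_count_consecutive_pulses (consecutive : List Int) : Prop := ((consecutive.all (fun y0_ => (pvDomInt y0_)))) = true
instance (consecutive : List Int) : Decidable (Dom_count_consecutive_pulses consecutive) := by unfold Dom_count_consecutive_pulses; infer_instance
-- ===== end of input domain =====

-- B replaces itertools.groupby run formation with a one-pass neighbor-triple (prev, cur, next) test; alternative decomposition, same cost.


-- ===== PORT A =====
-- itertools.groupby ported by hand: pvTakeRun v l splits off the maximal leading run of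
-- elements equal to v, returning (run length, remainder); exact for equality grouping.
def pvTakeRun (v : Int) : List Int → Nat × List Int
  | [] => (0, [])
  | a :: rest =>
      if a = v then
        let p := pvTakeRun v rest
        (p.1 + 1, p.2)
      else (0, a :: rest)

theorem pvTakeRun_len (v : Int) : ∀ l : List Int, (pvTakeRun v l).2.length ≤ l.length := by
  intro l
  induction l with
  | nil => simp [pvTakeRun]
  | cons a rest ih =>
      by_cases h : a = v <;> simp [pvTakeRun, h]
      omega

-- A's loop over groupby(consecutive): each group has key a and length (run+1);
-- count += 1 when a == 1 and the group length is 1.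
def count_consecutive_pulses (consecutive : List Int) : Int :=
  match consecutive with
  | [] => 0
  | a :: rest =>
      let p := pvTakeRun a rest
      (if a = 1 ∧ p.1 + 1 = 1 then 1 else 0) + count_consecutive_pulses p.2
termination_by consecutive.length
decreasing_by
  have := pvTakeRun_len a rest
  simp only [List.length_cons]
  omega

-- ===== PORT B =====
-- Source B: prevs = [None] + x[:-1]; nexts = x[1:] + [None]; sum over zip(prevs, x, nexts).
def count_consecutive_pulses_alt (consecutive : List Int) : Int :=
  let x := consecutive
  let prevs : List (Option Int) := none :: x.dropLast.map some
  let nexts : List (Option Int) := x.tail.map some ++ [none]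
  ((prevs.zip x).zip nexts).foldl
    (fun c t => if t.1.2 = 1 ∧ t.1.1 ≠ some t.1.2 ∧ t.2 ≠ some t.1.2 then c + 1 else c) 0

-- ===== PRECONDITION & SPEC =====
def Spec_count_consecutive_pulses (consecutive : List Int) (out : Int) : Prop := out = count_consecutive_pulses_alt consecutive
instance (consecutive : List Int) (out : Int) : Decidable (Spec_count_consecutive_pulses consecutive out) := by unfold Spec_count_consecutive_pulses; infer_instance

-- ===== CLAIM (what is proved, stated in full; the proofs are below) =====
def Claim_equal_count_consecutive_pulses : Prop := ∀ (consecutive : List Int), Dom_count_consecutive_pulses consecutive → Spec_count_consecutive_pulses consecutive (count_consecutive_pulses consecutive)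

-- ===== LEMMAS AND PROOFS =====

-- Middle spec: structural recursion carrying the previous element.
def pvIso : Option Int → List Int → Int
  | _, [] => 0
  | prev, a :: rest =>
      (if a = 1 ∧ prev ≠ some 1 ∧ rest.head? ≠ some 1 then 1 else 0) + pvIso (some a) rest

-- foldl with a counting step shifts out its accumulator
theorem pvFoldl_shift (p : (Option Int × Int) × Option Int → Prop) [DecidablePred p] :
    ∀ (l : List ((Option Int × Int) × Option Int)) (c : Int),
      l.foldl (fun c t => if p t then c + 1 else c) c
        = c + l.foldl (fun c t => if p t then c + 1 else c) 0 := by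
  intro l
  induction l with
  | nil => intro c; simp
  | cons t l ih =>
      intro c
      simp only [List.foldl_cons]
      rw [ih (if p t then c + 1 else c), ih (if p t then (0:Int) + 1 else 0)]
      split_ifs <;> omega

-- B's zip fold, generalized over the first "previous" slot, equals pvIso.
theorem pvZip_eq_iso :
    ∀ (x : List Int) (prev : Option Int),
      (((prev :: x.dropLast.map some).zip x).zip (x.tail.map some ++ [none])).foldl
        (fun c t => if t.1.2 = 1 ∧ t.1.1 ≠ some t.1.2 ∧ t.2 ≠ some t.1.2 then c + 1 else c) 0
      = pvIso prev x := by
  intro x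
  induction x with
  | nil => intro prev; simp [pvIso]
  | cons a rest ih =>
      intro prev
      match rest, ih with
      | [], _ =>
          simp only [pvIso, List.dropLast_singleton, List.map_nil, List.tail_cons, List.nil_append,
            List.zip_cons_cons, List.zip_nil_right, List.foldl_cons, List.foldl_nil, List.head?_nil]
          by_cases ha : a = 1
          · subst ha; simp
          · simp [ha]
      | b :: rest', ih =>
          have hdrop : (a :: b :: rest').dropLast = a :: (b :: rest').dropLast := by
            simp
          rw [hdrop]
          simp only [List.map_cons, List.tail_cons, List.zip_cons_cons, List.foldl_cons,
            List.map_cons, List.cons_append]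
          rw [pvFoldl_shift (fun t => t.1.2 = 1 ∧ t.1.1 ≠ some t.1.2 ∧ t.2 ≠ some t.1.2)]
          have hrec := ih (some a)
          simp only [List.tail_cons, List.zip_cons_cons] at hrec
          rw [hrec]
          simp only [pvIso, List.head?_cons]
          by_cases ha : a = 1
          · subst ha; simp
          · simp [ha]

-- Inside a run: with prev equal to the run's value, each run element contributes 0.
theorem pvIso_run (a : Int) :
    ∀ (n : Nat) (r : List Int), pvIso (some a) (List.replicate n a ++ r) = pvIso (some a) r := by
  intro n
  induction n with
  | zero => intro r; simp
  | succ m ih =>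
      intro r
      simp only [List.replicate_succ, List.cons_append, pvIso]
      rw [ih r]
      by_cases ha : a = 1
      · subst ha; simp
      · simp [ha]

-- pvTakeRun really splits off a maximal run.
theorem pvTakeRun_spec (v : Int) :
    ∀ l : List Int,
      l = List.replicate (pvTakeRun v l).1 v ++ (pvTakeRun v l).2
      ∧ (∀ b, (pvTakeRun v l).2.head? = some b → b ≠ v) := by
  intro l
  induction l with
  | nil => simp [pvTakeRun]
  | cons a rest ih =>
      by_cases h : a = v
      · subst h
        simp only [pvTakeRun]
        refine ⟨?_, ih.2⟩
        conv_lhs => rw [ih.1]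
        simp [List.replicate_succ]
      · simp only [pvTakeRun, if_neg h]
        refine ⟨by simp, ?_⟩
        intro b hb hbv
        simp at hb
        exact h (by rw [hb, hbv])

-- Unfolding equations for A's well-founded recursion.
theorem pvA_nil : count_consecutive_pulses [] = 0 := by
  rw [count_consecutive_pulses]

theorem pvA_cons (a : Int) (rest : List Int) :
    count_consecutive_pulses (a :: rest)
      = (if a = 1 ∧ (pvTakeRun a rest).1 + 1 = 1 then 1 else 0)
        + count_consecutive_pulses (pvTakeRun a rest).2 := by
  rw [count_consecutive_pulses]

-- A equals pvIso whenever prev differs from the head (the groupby invariant).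
theorem pvA_eq_iso :
    ∀ (n : Nat) (x : List Int) (prev : Option Int), x.length ≤ n →
      (∀ b, x.head? = some b → prev ≠ some b) →
      count_consecutive_pulses x = pvIso prev x := by
  intro n
  induction n with
  | zero =>
      intro x prev hlen _
      have : x = [] := List.length_eq_zero_iff.mp (Nat.le_zero.mp hlen)
      subst this
      simp [pvA_nil, pvIso]
  | succ m ih =>
      intro x prev hlen hprev
      match x with
      | [] => simp [pvA_nil, pvIso]
      | a :: rest =>
          have hspec := pvTakeRun_spec a rest
          have hlen2 : (pvTakeRun a rest).2.length ≤ rest.length := pvTakeRun_len a rest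
          have hlenrest : rest.length ≤ m := by simpa using hlen
          have hprev_a : prev ≠ some a := hprev a (by simp)
          have hhead2 : ∀ b, (pvTakeRun a rest).2.head? = some b → (some a : Option Int) ≠ some b := by
            intro b hb h
            exact (hspec.2 b hb) (by simpa using h.symm)
          rw [pvA_cons, ih (pvTakeRun a rest).2 (some a) (le_trans hlen2 hlenrest) hhead2]
          cases hn : (pvTakeRun a rest).1 with
          | zero =>
              have hrest : rest = (pvTakeRun a rest).2 := by
                have := hspec.1; rw [hn] at this; simpa using this
              rw [show pvIso prev (a :: rest)
                  = (if a = 1 ∧ prev ≠ some 1 ∧ rest.head? ≠ some 1 then 1 else 0)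
                    + pvIso (some a) rest from by rw [pvIso]]
              rw [← hrest]
              congr 1
              by_cases ha : a = 1
              · subst ha
                have h2 : rest.head? ≠ some 1 := by
                  intro hh
                  exact hspec.2 1 (by rw [← hrest]; exact hh) rfl
                simp [hprev_a, h2]
              · simp [ha]
          | succ k =>
              have hrest : rest = a :: (List.replicate k a ++ (pvTakeRun a rest).2) := by
                have := hspec.1; rw [hn] at this; simpa [List.replicate_succ] using this
              rw [show pvIso prev (a :: rest)
                  = (if a = 1 ∧ prev ≠ some 1 ∧ rest.head? ≠ some 1 then 1 else 0)
                    + pvIso (some a) rest from by rw [pvIso]]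
              have hfirst : (if a = 1 ∧ prev ≠ some 1
                  ∧ rest.head? ≠ some 1 then (1:Int) else 0) = 0 := by
                by_cases ha : a = 1
                · subst ha; rw [hrest]; simp
                · simp [ha]
              rw [hfirst]
              conv_rhs => rw [hrest]
              have hrun : pvIso (some a) (a :: (List.replicate k a ++ (pvTakeRun a rest).2))
                  = pvIso (some a) (pvTakeRun a rest).2 := by
                have := pvIso_run a (k + 1) (pvTakeRun a rest).2
                simpa [List.replicate_succ] using this
              rw [hrun]
              simp

-- ===== VERDICT (by name: the statement is the Claim_ definition above) =====
theorem count_consecutive_pulses_spec : Claim_equal_count_consecutive_pulses := by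
  intro x _
  unfold Spec_count_consecutive_pulses count_consecutive_pulses_alt
  rw [pvZip_eq_iso x none]
  exact pvA_eq_iso x.length x none le_rfl (by intro b _ h; cases h)
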